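-- pv_equiv track=rewrite | github.com/AdamZhouSE/pythonHomework | Code/CodeRecords/2122/60676/247125.py | possible_divisors
-- ===== SOURCE A (Python) =====
-- def possible_divisors(x, y):
--     gcd = 1
--     for i in range(min(x, y), 1, -1):
--         if x % i == 0 and y % i == 0:
--            gcd = i
--            break
--     divisors = [0, gcd]
--     while divisors[-1] + gcd < min(x, y):
--         divisors.append(divisors[-1] + gcd)
--     return divisors
-- ===== SOURCE B (Python) =====
-- def possible_divisors(x, y):
--     m = min(x, y)
--     if m >= 2:
--         a, b = x, y
--         while b:
--             a, b = b, a % b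
--         g = a
--     else:
--         g = 1
--     return [0, g] + list(range(2 * g, m, g))
-- ===== Notes on version B (the rewrite author's own statement) =====
-- stated objective: faster
-- what changed: Replaces A's downward O(min(x,y)) trial-division scan for the gcd with the Euclidean algorithm, and replaces the append-while loop over divisors[-1] with a direct range(2*g, min(x,y), g) of the multiples.
import Mathlib
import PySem

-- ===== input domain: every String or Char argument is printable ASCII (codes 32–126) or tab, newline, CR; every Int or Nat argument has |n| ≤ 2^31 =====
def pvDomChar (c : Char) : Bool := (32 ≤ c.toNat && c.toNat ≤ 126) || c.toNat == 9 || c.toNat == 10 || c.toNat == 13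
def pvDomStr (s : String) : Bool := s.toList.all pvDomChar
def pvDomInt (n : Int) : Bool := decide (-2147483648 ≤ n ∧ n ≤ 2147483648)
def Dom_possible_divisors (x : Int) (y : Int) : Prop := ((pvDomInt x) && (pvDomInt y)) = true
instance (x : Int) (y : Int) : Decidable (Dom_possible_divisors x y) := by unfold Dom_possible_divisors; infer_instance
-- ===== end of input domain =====

-- B replaces A's downward trial-division scan for the gcd by the Euclidean algorithm and
-- builds the multiples with a direct range instead of A's append-while loop.

-- ===== PORT A =====
-- 'for i in range(min(x,y), 1, -1): if x % i == 0 and y % i == 0: gcd = i; break'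
-- (gcd starts at 1; the break makes the loop return the first hit)
def pvGcdScan (x : Int) (y : Int) : List Int → Int
  | [] => 1
  | i :: rest =>
    if PySem.Int.mod x i == 0 && PySem.Int.mod y i == 0 then i else pvGcdScan x y rest

-- every element of range(min(x,y), 1, -1) is > 1, so the scan's result is positive;
-- the while-loop port below cites this for its termination argument
theorem pvGcdScan_pos (x y : Int) (L : List Int) (h : ∀ i ∈ L, 0 < i) :
    0 < pvGcdScan x y L := by
  induction L with
  | nil => simp [pvGcdScan]
  | cons i rest ih =>
    simp only [pvGcdScan]
    split
    · exact h i (by simp)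
    · exact ih (fun j hj => h j (by simp [hj]))

-- 'while divisors[-1] + gcd < min(x, y): divisors.append(divisors[-1] + gcd)';
-- `last` carries the value of divisors[-1] (the loop only ever reads the last element)
def pvWhileApp (m g : Int) (hg : 0 < g) (divs : List Int) (last : Int) : List Int :=
  if last + g < m then pvWhileApp m g hg (divs ++ [last + g]) (last + g) else divs
termination_by (m - last).toNat
decreasing_by omega

def possible_divisors (x : Int) (y : Int) : List Int :=
  let g := pvGcdScan x y (PySem.List.pyRange (min x y) 1 (-1))
  pvWhileApp (min x y) g
    (pvGcdScan_pos x y _ (fun i hi => by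
      have := (PySem.List.mem_pyRange_neg_one).mp hi; omega))
    [0, g] g

-- ===== PORT B =====
-- 'while b: a, b = b, a % b'
def pvEuclid (a : Int) (b : Int) : Int :=
  if _hb : b = 0 then a else pvEuclid b (PySem.Int.mod a b)
termination_by b.natAbs
decreasing_by
  rcases lt_trichotomy b 0 with h | h | h
  · have := PySem.Int.mod_neg_bounds a h; omega
  · exact absurd h _hb
  · have h1 := PySem.Int.mod_nonneg a h
    have h2 := PySem.Int.mod_lt a h
    omega

def possible_divisors_alt (x : Int) (y : Int) : List Int :=
  let m := min x y
  let g := if 2 ≤ m then pvEuclid x y else 1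
  [0, g] ++ PySem.List.pyRange (2 * g) m g

-- ===== PRECONDITION & SPEC =====
def Spec_possible_divisors (x : Int) (y : Int) (out : List Int) : Prop := out = possible_divisors_alt x y
instance (x : Int) (y : Int) (out : List Int) : Decidable (Spec_possible_divisors x y out) := by unfold Spec_possible_divisors; infer_instance

-- ===== CLAIM (what is proved, stated in full; the proofs are below) =====
def Claim_equal_possible_divisors : Prop := ∀ (x : Int) (y : Int), Dom_possible_divisors x y → Spec_possible_divisors x y (possible_divisors x y)

-- ===== LEMMAS AND PROOFS =====

-- the Euclidean loop computes the gcd on nonnegative inputs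
theorem pvEuclid_eq_gcd (n : Nat) : ∀ a b : Int, b.natAbs ≤ n → 0 ≤ a → 0 ≤ b →
    pvEuclid a b = Int.gcd a b := by
  induction n with
  | zero =>
    intro a b h ha hb
    have hb0 : b = 0 := by omega
    subst hb0
    rw [pvEuclid]
    simp [Int.natAbs_of_nonneg ha]
  | succ n ih =>
    intro a b h ha hb
    rw [pvEuclid]
    by_cases hb0 : b = 0
    · subst hb0; simp [Int.natAbs_of_nonneg ha]
    · rw [dif_neg hb0]
      have hbpos : 0 < b := by omega
      rw [PySem.Int.mod_eq_emod_of_pos hbpos]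
      have h1 : 0 ≤ a % b := Int.emod_nonneg a hb0
      have h2 : a % b < b := Int.emod_lt_of_pos a hbpos
      rw [ih b (a % b) (by omega) hb h1]
      have hnat : (a % b).natAbs = a.natAbs % b.natAbs := by
        have e1 : ((a.natAbs % b.natAbs : Nat) : Int) = a % b := by
          push_cast
          rw [abs_of_nonneg ha, abs_of_nonneg hb]
        rw [← e1, Int.natAbs_natCast]
      congr 1
      unfold Int.gcd
      rw [hnat, Nat.gcd_comm b.natAbs, ← Nat.gcd_rec, Nat.gcd_comm]

-- positive-step range: nil and cons forms
theorem pyRange_pos_nil {a b s : Int} (hs : 0 < s) (h : b ≤ a) :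
    PySem.List.pyRange a b s = [] := by
  rw [PySem.List.pyRange_of_pos a b hs]
  simp [show ¬ a < b by omega]

theorem pyRange_pos_cons {a b s : Int} (hs : 0 < s) (h : a < b) :
    PySem.List.pyRange a b s = a :: PySem.List.pyRange (a + s) b s := by
  rw [PySem.List.pyRange_of_pos a b hs, PySem.List.pyRange_of_pos (a + s) b hs]
  have hq0 : 0 ≤ (b - a - 1) / s := Int.ediv_nonneg (by omega) (by omega)
  have key : (b - a + s - 1) / s = (b - a - 1) / s + 1 := by
    have e : b - a + s - 1 = (b - a - 1) + 1 * s := by ring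
    rw [e, Int.add_mul_ediv_right _ _ (by omega : s ≠ 0)]
  have hcount' : (if a + s < b then ((b - (a + s) + s - 1) / s).toNat else 0)
      = ((b - a - 1) / s).toNat := by
    by_cases h2 : a + s < b
    · have e2 : b - (a + s) + s - 1 = b - a - 1 := by ring
      rw [if_pos h2, e2]
    · have e0 : (b - a - 1) / s = 0 := Int.ediv_eq_zero_of_lt (by omega) (by omega)
      rw [if_neg h2, e0]
      simp
  rw [if_pos h, hcount', key]
  have htn : ((b - a - 1) / s + 1).toNat = ((b - a - 1) / s).toNat + 1 := by omega
  rw [htn, List.range_succ_eq_map, List.map_cons, List.map_map]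
  congr 1
  · simp
  · apply List.map_congr_left
    intro k _
    simp only [Function.comp]
    push_cast
    ring

-- the append-while loop produces exactly the remaining multiples
theorem pvWhileApp_eq_aux (m g : Int) (hg : 0 < g) (n : Nat) :
    ∀ (divs : List Int) (last : Int), (m - last).toNat ≤ n →
    pvWhileApp m g hg divs last = divs ++ PySem.List.pyRange (last + g) m g := by
  induction n with
  | zero =>
    intro divs last h
    rw [pvWhileApp, if_neg (by omega), pyRange_pos_nil hg (by omega)]
    simp
  | succ n ih =>
    intro divs last h
    rw [pvWhileApp]
    by_cases hlt : last + g < m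
    · rw [if_pos hlt, ih (divs ++ [last + g]) (last + g) (by omega)]
      rw [List.append_assoc, pyRange_pos_cons hg hlt]
      simp
    · rw [if_neg hlt, pyRange_pos_nil hg (by omega)]
      simp

theorem pvWhileApp_eq (m g : Int) (hg : 0 < g) (divs : List Int) (last : Int) :
    pvWhileApp m g hg divs last = divs ++ PySem.List.pyRange (last + g) m g :=
  pvWhileApp_eq_aux m g hg (m - last).toNat divs last (le_refl _)

-- the downward scan from a ≥ gcd(x,y) finds the gcd
theorem pvGcdScan_eq_aux (x y : Int) (hx : 0 < x) (n : Nat) :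
    ∀ a : Int, (a - 1).toNat ≤ n → (Int.gcd x y : Int) ≤ a →
    pvGcdScan x y (PySem.List.pyRange a 1 (-1)) = Int.gcd x y := by
  have hGpos : 0 < (Int.gcd x y : Int) := by
    have : 0 < Int.gcd x y := Int.gcd_pos_iff.mpr (Or.inl (by omega))
    exact_mod_cast this
  have hGx : (Int.gcd x y : Int) ∣ x := Int.gcd_dvd_left x y
  have hGy : (Int.gcd x y : Int) ∣ y := Int.gcd_dvd_right x y
  induction n with
  | zero =>
    intro a h hGa
    rw [PySem.List.pyRange_neg_one_eq_nil (by omega)]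
    show (1 : Int) = Int.gcd x y
    omega
  | succ n ih =>
    intro a h hGa
    by_cases ha1 : a ≤ 1
    · rw [PySem.List.pyRange_neg_one_eq_nil (by omega)]
      show (1 : Int) = Int.gcd x y
      omega
    · rw [PySem.List.pyRange_neg_one_cons (by omega : (1:Int) < a)]
      simp only [pvGcdScan]
      by_cases hd : a ∣ x ∧ a ∣ y
      · rw [if_pos (by
          simp [PySem.Int.mod_eq_zero_iff_dvd]
          exact hd)]
        -- a is a common divisor and gcd ≤ a, so a = gcd
        have haG : a ∣ (Int.gcd x y : Int) := by
          have h1 : ((a.toNat : Int)) = a := by omega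
          have h2 : a.toNat ∣ Int.gcd x y :=
            Int.dvd_gcd (by rw [h1]; exact hd.1) (by rw [h1]; exact hd.2)
          rw [← h1]
          exact_mod_cast h2
        have : a ≤ (Int.gcd x y : Int) := Int.le_of_dvd hGpos haG
        omega
      · rw [if_neg (by
          simp [PySem.Int.mod_eq_zero_iff_dvd]
          intro hdx; exact fun hdy => hd ⟨hdx, hdy⟩)]
        have hGne : (Int.gcd x y : Int) ≠ a := by
          intro he
          exact hd ⟨he ▸ hGx, he ▸ hGy⟩
        exact ih (a - 1) (by omega) (by omega)

theorem pvGcdScan_eq (x y a : Int) (hx : 0 < x) (_hy : 0 < y)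
    (hGa : (Int.gcd x y : Int) ≤ a) :
    pvGcdScan x y (PySem.List.pyRange a 1 (-1)) = Int.gcd x y :=
  pvGcdScan_eq_aux x y hx (a - 1).toNat a (le_refl _) hGa

-- ===== VERDICT (by name: the statement is the Claim_ definition above) =====
theorem possible_divisors_spec : Claim_equal_possible_divisors := by
  intro x y _
  show possible_divisors x y = possible_divisors_alt x y
  simp only [possible_divisors, possible_divisors_alt]
  rw [pvWhileApp_eq]
  by_cases hm : 2 ≤ min x y
  · have hx : 0 < x := lt_of_lt_of_le (by omega) (le_trans hm (min_le_left x y))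
    have hy : 0 < y := lt_of_lt_of_le (by omega) (le_trans hm (min_le_right x y))
    have hGx : (Int.gcd x y : Int) ∣ x := Int.gcd_dvd_left x y
    have hGy : (Int.gcd x y : Int) ∣ y := Int.gcd_dvd_right x y
    have hGm : (Int.gcd x y : Int) ≤ min x y :=
      le_min (Int.le_of_dvd hx hGx) (Int.le_of_dvd hy hGy)
    rw [pvGcdScan_eq x y (min x y) hx hy hGm, if_pos hm,
      pvEuclid_eq_gcd y.natAbs x y (le_refl _) (by omega) (by omega), two_mul]
  · rw [PySem.List.pyRange_neg_one_eq_nil (by omega : min x y ≤ 1), if_neg hm]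
    norm_num [pvGcdScan]
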